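-- pv_equiv track=rewrite | github.com/xiuwenz2/SAP-Hypo5 | utils/postprocessing.py | _compress_consecutive_runs_of_unit_selective
-- ===== SOURCE A (Python) =====
-- from typing import List, Tuple, Optional, Dict, Any
--
-- def _compress_consecutive_runs_of_unit_selective(
--     words: List[str],
--     unit: List[str],
--     min_repeats: int = 2,
--     # heuristics
--     max_keep_repeats_non_tail: int = 3,  # keep ≤3 repeats if there is content after the run
--     tail_keep_repeats: int = 2,          # keep exactly 2 repeats at sentence tail
--     tail_max_unit_len: int = 2,          # only keep tail repeats if unit length ≤ this
--     default_keep_repeats: int = 1,       # compress other runs to this many repeats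
-- ) -> List[str]:
--     """
--     For each *contiguous* run of `unit`, decide to keep it or compress it:
--       - Start/middle runs with content after them: keep if repeats ≤ max_keep_repeats_non_tail.
--       - Tail runs (at end) with content before them: keep if repeats == tail_keep_repeats and len(unit) ≤ tail_max_unit_len.
--       - Otherwise, compress the run to `default_keep_repeats` repeats.
--     Non-contiguous re-occurrences are not modified.
--     """
--     n, m = len(words), len(unit)
--     if n == 0 or m == 0:
--         return words[:]
--
--     out: List[str] = []
--     i = 0
--     while i < n:
--         if i + m <= n and words[i : i + m] == unit:
--             # count contiguous repeats
--             repeats = 1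
--             j = i + m
--             while j + m <= n and words[j : j + m] == unit:
--                 repeats += 1
--                 j += m
--
--             if repeats >= min_repeats:
--                 has_after = (j < n)
--                 has_before = (i > 0)
--                 is_tail = (j == n)
--
--                 keep = False
--                 if has_after and repeats <= max_keep_repeats_non_tail:
--                     keep = True
--                 elif is_tail and has_before and repeats == tail_keep_repeats and m <= tail_max_unit_len:
--                     keep = True
--
--                 out.extend(unit * (repeats if keep else default_keep_repeats))
--                 i = j
--             else:
--                 out.append(words[i])
--                 i += 1
--         else:
--             out.append(words[i])
--             i += 1
--     return out
-- ===== SOURCE B (Python) =====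
-- from typing import List
--
-- def _compress_consecutive_runs_of_unit_selective(
--     words: List[str],
--     unit: List[str],
--     min_repeats: int = 2,
--     max_keep_repeats_non_tail: int = 3,
--     tail_keep_repeats: int = 2,
--     tail_max_unit_len: int = 2,
--     default_keep_repeats: int = 1,
-- ) -> List[str]:
--     n, m = len(words), len(unit)
--     if n == 0 or m == 0:
--         return words[:]
--     # Phase 1: run-length table, built right-to-left.
--     # reps[i] = number of contiguous copies of `unit` starting at position i.
--     reps = [0] * (n + m)
--     for i in range(n - m, -1, -1):
--         if words[i:i + m] == unit:
--             reps[i] = reps[i + m] + 1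
--     # Phase 2: single emit pass driven by the table.
--     out: List[str] = []
--     i = 0
--     while i < n:
--         r = reps[i]
--         if r >= 1 and r >= min_repeats:
--             j = i + m * r
--             keep = (j < n and r <= max_keep_repeats_non_tail) or (
--                 j == n and i > 0 and r == tail_keep_repeats and m <= tail_max_unit_len)
--             out.extend(unit * (r if keep else default_keep_repeats))
--             i = j
--         else:
--             out.append(words[i])
--             i += 1
--     return out
-- ===== Notes on version B (the rewrite author's own statement) =====
-- stated objective: alternative
-- what changed: Replaces A's interleaved nested-while scan (inner slice-comparison loop counting repeats during output construction) by a two-phase algorithm: a right-to-left dynamic-programming run-length table reps[i] = reps[i+m]+1, then one table-driven emit pass with no inner loop.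
import Mathlib
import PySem

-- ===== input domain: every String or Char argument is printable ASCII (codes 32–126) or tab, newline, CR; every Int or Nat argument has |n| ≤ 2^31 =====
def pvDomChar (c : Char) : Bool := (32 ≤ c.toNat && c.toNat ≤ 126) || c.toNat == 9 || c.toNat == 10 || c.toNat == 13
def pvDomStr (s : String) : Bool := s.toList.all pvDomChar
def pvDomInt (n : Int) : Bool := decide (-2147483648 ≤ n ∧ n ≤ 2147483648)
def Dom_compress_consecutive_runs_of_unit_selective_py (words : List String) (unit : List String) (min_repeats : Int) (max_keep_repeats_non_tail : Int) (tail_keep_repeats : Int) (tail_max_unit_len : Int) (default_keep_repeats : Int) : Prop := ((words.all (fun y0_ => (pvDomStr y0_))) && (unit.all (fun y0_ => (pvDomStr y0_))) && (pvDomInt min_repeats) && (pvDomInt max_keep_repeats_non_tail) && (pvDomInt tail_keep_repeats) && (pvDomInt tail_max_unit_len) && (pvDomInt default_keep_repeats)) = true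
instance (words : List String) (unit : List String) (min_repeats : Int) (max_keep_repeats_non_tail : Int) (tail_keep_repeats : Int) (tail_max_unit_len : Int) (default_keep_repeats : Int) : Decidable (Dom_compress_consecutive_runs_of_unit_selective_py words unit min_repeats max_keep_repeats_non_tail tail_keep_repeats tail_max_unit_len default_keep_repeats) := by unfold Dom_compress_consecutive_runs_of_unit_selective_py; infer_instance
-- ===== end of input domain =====

-- B replaces A's interleaved nested-while scan by a two-phase algorithm (a right-to-left
-- run-length table reps[i] = reps[i+m]+1, then one table-driven emit pass); objective: alternative.

-- ===== PORT A =====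

-- Python's `unit * k` for an int k (empty when k ≤ 0); used by both Pythons verbatim.
def pyListMul (xs : List String) (k : Int) : List String :=
  (List.replicate k.toNat xs).flatten

-- inner while loop of A: `while j + m <= n and words[j:j+m] == unit: repeats += 1; j += m`
-- (fuel is totalization scaffolding only: with fuel = len(words) it never runs out, see aInner_eq below)
def aInner (words unit : List String) (fuel repeats j : Nat) : Nat × Nat :=
  match fuel with
  | 0 => (repeats, j)
  | fuel + 1 =>
    if j + unit.length ≤ words.length ∧
        PySem.List.slice words (some (j : Int)) (some ((j : Int) + (unit.length : Int))) = unit then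
      aInner words unit fuel (repeats + 1) (j + unit.length)
    else
      (repeats, j)

-- outer while loop of A (fuel = len(words) suffices: i strictly increases each iteration)
def aLoop (words unit : List String)
    (min_repeats max_keep_repeats_non_tail tail_keep_repeats tail_max_unit_len default_keep_repeats : Int)
    (fuel : Nat) (out : List String) (i : Nat) : List String :=
  match fuel with
  | 0 => out
  | fuel + 1 =>
    if i < words.length then
      if i + unit.length ≤ words.length ∧
          PySem.List.slice words (some (i : Int)) (some ((i : Int) + (unit.length : Int))) = unit then
        let p := aInner words unit words.length 1 (i + unit.length)
        if min_repeats ≤ (p.1 : Int) then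
          let keep : Bool :=
            (decide (p.2 < words.length) && decide ((p.1 : Int) ≤ max_keep_repeats_non_tail)) ||
            (decide (p.2 = words.length) && decide (0 < i) && decide ((p.1 : Int) = tail_keep_repeats)
              && decide ((unit.length : Int) ≤ tail_max_unit_len))
          aLoop words unit min_repeats max_keep_repeats_non_tail tail_keep_repeats tail_max_unit_len default_keep_repeats
            fuel (out ++ pyListMul unit (if keep then (p.1 : Int) else default_keep_repeats)) p.2
        else
          aLoop words unit min_repeats max_keep_repeats_non_tail tail_keep_repeats tail_max_unit_len default_keep_repeats
            fuel (out ++ [words.getD i ""]) (i + 1)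
      else
        aLoop words unit min_repeats max_keep_repeats_non_tail tail_keep_repeats tail_max_unit_len default_keep_repeats
          fuel (out ++ [words.getD i ""]) (i + 1)
    else out

def compress_consecutive_runs_of_unit_selective_py (words : List String) (unit : List String) (min_repeats : Int) (max_keep_repeats_non_tail : Int) (tail_keep_repeats : Int) (tail_max_unit_len : Int) (default_keep_repeats : Int) : List String :=
  if words.length = 0 ∨ unit.length = 0 then words
  else
    aLoop words unit min_repeats max_keep_repeats_non_tail tail_keep_repeats tail_max_unit_len default_keep_repeats
      words.length [] 0

-- ===== PORT B =====

-- phase 1 of B: `reps = [0]*(n+m); for i in range(n-m,-1,-1): if words[i:i+m]==unit: reps[i]=reps[i+m]+1`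
def bReps (words unit : List String) : List Int :=
  (PySem.List.pyRange ((words.length : Int) - (unit.length : Int)) (-1) (-1)).foldl
    (fun reps i =>
      if PySem.List.slice words (some i) (some (i + (unit.length : Int))) = unit then
        reps.set i.toNat (PySem.List.pyGetD reps (i + (unit.length : Int)) 0 + 1)
      else reps)
    (List.replicate (words.length + unit.length) 0)

-- phase 2 of B: the table-driven emit pass (fuel as in aLoop: i strictly increases each iteration)
def bLoop (words unit : List String) (reps : List Int)
    (min_repeats max_keep_repeats_non_tail tail_keep_repeats tail_max_unit_len default_keep_repeats : Int)
    (fuel : Nat) (out : List String) (i : Nat) : List String :=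
  match fuel with
  | 0 => out
  | fuel + 1 =>
    if i < words.length then
      let r := PySem.List.pyGetD reps (i : Int) 0
      if 1 ≤ r ∧ min_repeats ≤ r then
        let j := i + unit.length * r.toNat
        let keep : Bool :=
          (decide (j < words.length) && decide (r ≤ max_keep_repeats_non_tail)) ||
          (decide (j = words.length) && decide (0 < i) && decide (r = tail_keep_repeats)
            && decide ((unit.length : Int) ≤ tail_max_unit_len))
        bLoop words unit reps min_repeats max_keep_repeats_non_tail tail_keep_repeats tail_max_unit_len default_keep_repeats
          fuel (out ++ pyListMul unit (if keep then r else default_keep_repeats)) j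
      else
        bLoop words unit reps min_repeats max_keep_repeats_non_tail tail_keep_repeats tail_max_unit_len default_keep_repeats
          fuel (out ++ [words.getD i ""]) (i + 1)
    else out

def compress_consecutive_runs_of_unit_selective_py_alt (words : List String) (unit : List String) (min_repeats : Int) (max_keep_repeats_non_tail : Int) (tail_keep_repeats : Int) (tail_max_unit_len : Int) (default_keep_repeats : Int) : List String :=
  if words.length = 0 ∨ unit.length = 0 then words
  else
    bLoop words unit (bReps words unit) min_repeats max_keep_repeats_non_tail tail_keep_repeats tail_max_unit_len default_keep_repeats
      words.length [] 0

-- ===== PRECONDITION & SPEC =====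
def Spec_compress_consecutive_runs_of_unit_selective_py (words : List String) (unit : List String) (min_repeats : Int) (max_keep_repeats_non_tail : Int) (tail_keep_repeats : Int) (tail_max_unit_len : Int) (default_keep_repeats : Int) (out : List String) : Prop := out = compress_consecutive_runs_of_unit_selective_py_alt words unit min_repeats max_keep_repeats_non_tail tail_keep_repeats tail_max_unit_len default_keep_repeats
instance (words : List String) (unit : List String) (min_repeats : Int) (max_keep_repeats_non_tail : Int) (tail_keep_repeats : Int) (tail_max_unit_len : Int) (default_keep_repeats : Int) (out : List String) : Decidable (Spec_compress_consecutive_runs_of_unit_selective_py words unit min_repeats max_keep_repeats_non_tail tail_keep_repeats tail_max_unit_len default_keep_repeats out) := by unfold Spec_compress_consecutive_runs_of_unit_selective_py; infer_instance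

-- ===== CLAIM (what is proved, stated in full; the proofs are below) =====
def Claim_equal_compress_consecutive_runs_of_unit_selective_py : Prop := ∀ (words : List String) (unit : List String) (min_repeats : Int) (max_keep_repeats_non_tail : Int) (tail_keep_repeats : Int) (tail_max_unit_len : Int) (default_keep_repeats : Int), Dom_compress_consecutive_runs_of_unit_selective_py words unit min_repeats max_keep_repeats_non_tail tail_keep_repeats tail_max_unit_len default_keep_repeats → Spec_compress_consecutive_runs_of_unit_selective_py words unit min_repeats max_keep_repeats_non_tail tail_keep_repeats tail_max_unit_len default_keep_repeats (compress_consecutive_runs_of_unit_selective_py words unit min_repeats max_keep_repeats_non_tail tail_keep_repeats tail_max_unit_len default_keep_repeats)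

-- ===== LEMMAS AND PROOFS =====

-- reference run-length function: number of contiguous copies of `unit` starting at i
def repsF (words unit : List String) (hm : unit ≠ []) (i : Nat) : Nat :=
  if (words.drop i).take unit.length = unit then repsF words unit hm (i + unit.length) + 1 else 0
termination_by words.length + 1 - i
decreasing_by
  have hm' : 0 < unit.length := List.length_pos_iff.mpr hm
  rename_i h
  have hlen : ((words.drop i).take unit.length).length = unit.length := by rw [h]
  simp only [List.length_take, List.length_drop] at hlen
  omega

-- a slice match implies the window fits
theorem match_bound (words unit : List String) (hm : unit ≠ []) (i : Nat)
    (h : (words.drop i).take unit.length = unit) : i + unit.length ≤ words.length := by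
  have hm' : 0 < unit.length := List.length_pos_iff.mpr hm
  have hlen : ((words.drop i).take unit.length).length = unit.length := by rw [h]
  simp only [List.length_take, List.length_drop] at hlen
  omega

theorem repsF_pos (words unit : List String) (hm : unit ≠ []) (i : Nat)
    (h : (words.drop i).take unit.length = unit) :
    repsF words unit hm i = repsF words unit hm (i + unit.length) + 1 := by
  rw [repsF, if_pos h]

theorem repsF_zero (words unit : List String) (hm : unit ≠ []) (i : Nat)
    (h : ¬ (words.drop i).take unit.length = unit) :
    repsF words unit hm i = 0 := by
  rw [repsF, if_neg h]

theorem repsF_ge (words unit : List String) (hm : unit ≠ []) (i : Nat)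
    (h : words.length < i + unit.length) : repsF words unit hm i = 0 := by
  apply repsF_zero
  intro hmatch
  have := match_bound words unit hm i hmatch
  omega

-- the value bReps should hold at position t
def repsVal (words unit : List String) (hm : unit ≠ []) (t : Nat) : Int :=
  if t < words.length then (repsF words unit hm t : Int) else 0

-- invariant-preserving foldl over the countdown range
theorem bReps_build (words unit : List String) (hm : unit ≠ []) (k : Nat)
    (hk : k + unit.length ≤ words.length + 1)
    (reps : List Int) (hlen : reps.length = words.length + unit.length)
    (hhi : ∀ t : Nat, k ≤ t → reps.getD t 0 = repsVal words unit hm t)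
    (hlo : ∀ t : Nat, t < k → reps.getD t 0 = 0) :
    ∀ t : Nat,
      ((PySem.List.pyRange ((k : Int) - 1) (-1) (-1)).foldl
        (fun reps i =>
          if PySem.List.slice words (some i) (some (i + (unit.length : Int))) = unit then
            reps.set i.toNat (PySem.List.pyGetD reps (i + (unit.length : Int)) 0 + 1)
          else reps) reps).getD t 0 = repsVal words unit hm t := by
  induction k generalizing reps with
  | zero =>
    rw [PySem.List.pyRange_neg_one_eq_nil (by omega)]
    intro t; exact hhi t (Nat.zero_le t)
  | succ k ih =>
    have hm' : 0 < unit.length := List.length_pos_iff.mpr hm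
    rw [show ((k + 1 : Nat) : Int) - 1 = (k : Int) by push_cast; ring,
        PySem.List.pyRange_neg_one_cons (by omega), List.foldl_cons]
    -- the step at index k
    have hsl : PySem.List.slice words (some (k : Int)) (some ((k : Int) + (unit.length : Int))) =
        (words.drop k).take unit.length := PySem.List.slice_natCast_add words k unit.length
    by_cases hc : (words.drop k).take unit.length = unit
    · rw [if_pos (by rw [hsl]; exact hc)]
      have hkm : k + unit.length ≤ words.length := match_bound words unit hm k hc
      have hget : PySem.List.pyGetD reps ((k : Int) + (unit.length : Int)) 0 =
          repsVal words unit hm (k + unit.length) := by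
        rw [show (k : Int) + (unit.length : Int) = ((k + unit.length : Nat) : Int) by push_cast; ring,
            PySem.List.pyGetD_natCast]
        exact hhi (k + unit.length) (by omega)
      apply ih (by omega)
      · simp [hlen]
      · intro t ht
        rw [show ((k : Int)).toNat = k by simp]
        by_cases htk : t = k
        · subst htk
          have htlt : t < reps.length := by omega
          rw [List.getD, List.getElem?_set_self (by omega)]
          simp only [Option.getD_some]
          rw [hget]
          have : repsVal words unit hm (t + unit.length) =
              (repsF words unit hm (t + unit.length) : Int) := by
            by_cases h2 : t + unit.length < words.length
            · rw [repsVal, if_pos h2]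
            · rw [repsVal, if_neg h2, repsF_ge words unit hm _ (by omega)]; simp
          rw [this, repsVal, if_pos (by omega), repsF_pos words unit hm t hc]
          push_cast; ring
        · rw [List.getD, List.getElem?_set_ne (by omega), ← List.getD]
          exact hhi t (by omega)
      · intro t ht
        rw [show ((k : Int)).toNat = k by simp]
        rw [List.getD, List.getElem?_set_ne (by omega), ← List.getD]
        exact hlo t (by omega)
    · rw [if_neg (by rw [hsl]; exact hc)]
      apply ih (by omega) reps hlen
      · intro t ht
        by_cases htk : t = k
        · subst htk
          rw [hlo t (by omega), repsVal, if_pos (by omega), repsF_zero words unit hm t hc]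
          simp
        · exact hhi t (by omega)
      · intro t ht; exact hlo t (by omega)

theorem bReps_getD (words unit : List String) (hm : unit ≠ []) (t : Nat) :
    (bReps words unit).getD t 0 = repsVal words unit hm t := by
  have hm' : 0 < unit.length := List.length_pos_iff.mpr hm
  have hzero : ∀ t : Nat,
      (List.replicate (words.length + unit.length) (0 : Int)).getD t 0 = 0 := by
    intro t
    by_cases h : t < words.length + unit.length
    · rw [List.getD, List.getElem?_replicate_of_lt h]; rfl
    · rw [List.getD, List.getElem?_eq_none (by simpa using h)]; rfl
  by_cases hmn : unit.length ≤ words.length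
  · have hcast : (words.length : Int) - (unit.length : Int) =
        ((words.length - unit.length + 1 : Nat) : Int) - 1 := by
      push_cast [Nat.cast_sub hmn]; ring
    have := bReps_build words unit hm (words.length - unit.length + 1) (by omega)
      (List.replicate (words.length + unit.length) 0) (by simp)
      (fun t ht => by
        rw [hzero t, repsVal]
        split_ifs with h
        · rw [repsF_ge words unit hm t (by omega)]; rfl
        · rfl)
      (fun t ht => hzero t)
    rw [bReps, hcast]
    exact this t
  · rw [bReps, PySem.List.pyRange_neg_one_eq_nil (by omega), List.foldl_nil, hzero t,
        repsVal]
    split_ifs with h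
    · rw [repsF_ge words unit hm t (by omega)]; rfl
    · rfl

-- aInner computes the run length and the end of the run
theorem aInner_eq (words unit : List String) (hm : unit ≠ []) (fuel repeats j : Nat)
    (hf : words.length + 1 ≤ fuel + j) :
    aInner words unit fuel repeats j =
      (repeats + repsF words unit hm j, j + unit.length * repsF words unit hm j) := by
  have hm' : 0 < unit.length := List.length_pos_iff.mpr hm
  induction fuel generalizing repeats j with
  | zero =>
    rw [aInner, repsF_ge words unit hm j (by omega)]
    simp
  | succ fuel ih =>
    have hsl : PySem.List.slice words (some (j : Int)) (some ((j : Int) + (unit.length : Int))) =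
        (words.drop j).take unit.length := PySem.List.slice_natCast_add words j unit.length
    by_cases hc : (words.drop j).take unit.length = unit
    · rw [aInner, if_pos ⟨match_bound words unit hm j hc, by rw [hsl]; exact hc⟩,
          ih (repeats + 1) (j + unit.length) (by omega), repsF_pos words unit hm j hc]
      rw [Prod.mk.injEq]
      exact ⟨by omega, by ring⟩
    · rw [aInner, if_neg (by rw [hsl]; intro h; exact hc h.2),
          repsF_zero words unit hm j hc]
      simp

-- main loop equivalence
theorem loop_eq (words unit : List String) (hm : unit ≠ [])
    (min_repeats max_keep_repeats_non_tail tail_keep_repeats tail_max_unit_len default_keep_repeats : Int)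
    (fuel i : Nat) (out : List String) (hf : words.length ≤ fuel + i) :
    aLoop words unit min_repeats max_keep_repeats_non_tail tail_keep_repeats tail_max_unit_len default_keep_repeats fuel out i =
    bLoop words unit (bReps words unit) min_repeats max_keep_repeats_non_tail tail_keep_repeats tail_max_unit_len default_keep_repeats fuel out i := by
  have hm' : 0 < unit.length := List.length_pos_iff.mpr hm
  induction fuel generalizing i out with
  | zero => rw [aLoop, bLoop]
  | succ fuel ih =>
  by_cases hi : i < words.length
  · have hr : PySem.List.pyGetD (bReps words unit) (i : Int) 0 = repsVal words unit hm i := by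
      rw [PySem.List.pyGetD_natCast]; exact bReps_getD words unit hm i
    have hrv : repsVal words unit hm i = (repsF words unit hm i : Int) := by
      rw [repsVal, if_pos hi]
    have hsl : PySem.List.slice words (some (i : Int)) (some ((i : Int) + (unit.length : Int))) =
        (words.drop i).take unit.length := PySem.List.slice_natCast_add words i unit.length
    by_cases hc : (words.drop i).take unit.length = unit
    · -- a run starts at i
      have hrepsF : repsF words unit hm i = repsF words unit hm (i + unit.length) + 1 :=
        repsF_pos words unit hm i hc
      have hcA : i + unit.length ≤ words.length ∧
          PySem.List.slice words (some (i : Int)) (some ((i : Int) + (unit.length : Int))) = unit :=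
        ⟨match_bound words unit hm i hc, by rw [hsl]; exact hc⟩
      rw [aLoop, if_pos hi, if_pos hcA, bLoop, if_pos hi]
      simp only [aInner_eq words unit hm words.length 1 (i + unit.length) (by omega), hr, hrv]
      have hp1 : 1 + repsF words unit hm (i + unit.length) = repsF words unit hm i := by omega
      have hp2 : i + unit.length + unit.length * repsF words unit hm (i + unit.length) =
          i + unit.length * repsF words unit hm i := by rw [hrepsF]; ring
      have hstep : 1 ≤ unit.length * repsF words unit hm i := by
        have : 1 ≤ repsF words unit hm i := by omega
        exact Nat.one_le_iff_ne_zero.mpr (by positivity)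
      by_cases hmin : min_repeats ≤ (repsF words unit hm i : Int)
      · have hB : 1 ≤ ((repsF words unit hm i : Nat) : Int) ∧
            min_repeats ≤ ((repsF words unit hm i : Nat) : Int) :=
          ⟨by exact_mod_cast Nat.one_le_iff_ne_zero.mpr (by omega), hmin⟩
        rw [if_pos (by simpa [hp1] using hmin), if_pos hB]
        simp only [hp1, hp2, Int.toNat_natCast]
        refine ih _ _ ?_
        omega
      · rw [if_neg (by simpa [hp1] using hmin),
            if_neg (by push Not; intro _; exact lt_of_not_ge hmin)]
        refine ih _ _ ?_
        omega
    · -- no run starts at i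
      have hrz : repsF words unit hm i = 0 := repsF_zero words unit hm i hc
      rw [aLoop, if_pos hi, if_neg (by rw [hsl]; intro h; exact hc h.2),
          bLoop, if_pos hi, if_neg (by rw [hr, hrv, hrz]; push Not; intro h; omega)]
      refine ih _ _ ?_
      omega
  · rw [aLoop, if_neg hi, bLoop, if_neg hi]

-- ===== VERDICT (by name: the statement is the Claim_ definition above) =====
theorem compress_consecutive_runs_of_unit_selective_py_spec : Claim_equal_compress_consecutive_runs_of_unit_selective_py := by
  intro words unit min_repeats max_keep_repeats_non_tail tail_keep_repeats tail_max_unit_len default_keep_repeats _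
  unfold Spec_compress_consecutive_runs_of_unit_selective_py
  unfold compress_consecutive_runs_of_unit_selective_py compress_consecutive_runs_of_unit_selective_py_alt
  by_cases h : words.length = 0 ∨ unit.length = 0
  · rw [if_pos h, if_pos h]
  · rw [if_neg h, if_neg h]
    have hm : unit ≠ [] := by
      intro hu
      exact h (Or.inr (by simp [hu]))
    exact loop_eq words unit hm min_repeats max_keep_repeats_non_tail tail_keep_repeats tail_max_unit_len default_keep_repeats
      words.length 0 [] (by omega)
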